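-- pv_equiv track=rewrite | github.com/savineo/LinkCodeEdit | LinkCodeEdit.py | strip_comments_python_strict
-- ===== SOURCE A (Python) =====
-- def strip_comments_python_strict(code: str) -> str:
--     out = []
--     i = 0
--     n = len(code)
--     in_str = False
--     delim = ''
--     triple = False
--     esc = False
--
--     def only_ws_on_current_line() -> bool:
--         j = len(out) - 1
--         while j >= 0 and out[j] != '\n':
--             if not out[j].isspace():
--                 return False
--             j -= 1
--         return True
--
--     def pop_line_indent():
--         while out and out[-1] != '\n' and out[-1] in ' \t':
--             out.pop()
--
--     while i < n:
--         c = code[i]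
--         if in_str:
--             out.append(c)
--             if triple:
--                 if c == delim and i + 2 < n and code[i+1] == delim and code[i+2] == delim:
--                     out.append(code[i+1]); out.append(code[i+2])
--                     in_str = False; triple = False
--                     i += 3
--                 else:
--                     i += 1
--                 continue
--             else:
--                 if esc:
--                     esc = False; i += 1; continue
--                 if c == '\\':
--                     esc = True; i += 1; continue
--                 if c == delim:
--                     in_str = False; i += 1; continue
--                 i += 1; continue
--
--         if c in ("'", '"'):
--             if i + 2 < n and code[i+1] == c and code[i+2] == c:
--                 in_str = True; delim = c; triple = True
--                 out.extend(c*3); i += 3; continue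
--             else:
--                 in_str = True; delim = c; triple = False
--                 out.append(c); i += 1; continue
--
--         if c == '#':
--             full_line = only_ws_on_current_line()
--             if full_line:
--                 pop_line_indent()
--             else:
--
--                 while out and out[-1] in ' \t':
--                     out.pop()
--
--             while i < n and code[i] != '\n':
--                 i += 1
--
--             if i < n and code[i] == '\n':
--                 if not full_line:
--                     out.append('\n')
--                 i += 1
--             continue
--
--         out.append(c); i += 1
--
--     return ''.join(out)
-- ===== SOURCE B (Python) =====
-- def strip_comments_python_strict(code: str) -> str:
--     # One forward pass: instead of scanning back over the output to classify a
--     # comment line and popping blanks, keep the trailing run of ' '/'\t' in a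
--     # separate pending buffer and a flag saying the current output line is all
--     # whitespace; a '#' just drops the pending blanks and consults the flag.
--     out = []          # committed output; never ends in ' '/'\t' while outside a string
--     pend = []         # uncommitted trailing run of ' ' / '\t'
--     ws_line = True    # everything emitted since the last '\n' is whitespace
--     i = 0
--     n = len(code)
--     in_str = False
--     delim = ''
--     triple = False
--     esc = False
--
--     def emit(c):
--         nonlocal ws_line
--         out.extend(pend)
--         pend.clear()
--         out.append(c)
--         ws_line = True if c == '\n' else (ws_line and c.isspace())
--
--     while i < n:
--         c = code[i]
--         if in_str:
--             emit(c)
--             if triple: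
--                 if c == delim and i + 2 < n and code[i+1] == delim and code[i+2] == delim:
--                     emit(code[i+1]); emit(code[i+2])
--                     in_str = False; triple = False
--                     i += 3
--                 else:
--                     i += 1
--                 continue
--             if esc:
--                 esc = False
--             elif c == '\\':
--                 esc = True
--             elif c == delim:
--                 in_str = False
--             i += 1
--             continue
--         if c in ("'", '"'):
--             if i + 2 < n and code[i+1] == c and code[i+2] == c:
--                 in_str = True; delim = c; triple = True
--                 emit(c); emit(c); emit(c)
--                 i += 3
--             else:
--                 in_str = True; delim = c; triple = False
--                 emit(c)
--                 i += 1
--             continue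
--         if c == '#':
--             pend.clear()                 # drop indentation / trailing blanks
--             keep_newline = not ws_line
--             while i < n and code[i] != '\n':
--                 i += 1
--             if i < n:
--                 if keep_newline:
--                     emit('\n')
--                 i += 1
--             continue
--         if c in ' \t':
--             pend.append(c)
--         else:
--             emit(c)
--         i += 1
--     return ''.join(out) + ''.join(pend)
-- ===== Notes on version B (the rewrite author's own statement) =====
-- stated objective: alternative
-- what changed: A classifies and trims comment lines by scanning backwards over the output list and popping blanks (only_ws_on_current_line, pop_line_indent, trailing-blank pops); B is a single forward pass that maintains a pending blank-run buffer and an all-whitespace-line flag, so reaching a comment marker needs no re-scan of the output.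
import Mathlib
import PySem

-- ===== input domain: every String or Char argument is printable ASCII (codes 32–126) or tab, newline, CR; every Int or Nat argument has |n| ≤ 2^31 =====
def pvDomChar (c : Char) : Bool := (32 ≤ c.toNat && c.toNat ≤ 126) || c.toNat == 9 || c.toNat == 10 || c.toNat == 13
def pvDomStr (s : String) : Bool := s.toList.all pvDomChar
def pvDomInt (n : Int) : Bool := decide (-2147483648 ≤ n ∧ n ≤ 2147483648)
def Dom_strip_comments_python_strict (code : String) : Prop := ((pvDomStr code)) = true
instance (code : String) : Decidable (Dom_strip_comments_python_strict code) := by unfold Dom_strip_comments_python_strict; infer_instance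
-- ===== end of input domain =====

-- B replaces A's backward scans/pops over the output (only_ws_on_current_line, pop_line_indent,
-- trailing-blank pops) by forward-maintained state: a pending blank-run buffer and an
-- all-whitespace-line flag; one forward pass, no re-scanning of the output.

-- ===== PORT A =====
-- out lists are kept REVERSED (Python appends/pops at the end = cons/tail at the head).

-- helper only_ws_on_current_line: walk back (here: from the head) until '\n'
def pvOnlyWs : List Char → Bool
  | [] => true
  | c :: t => if c = '\n' then true else PySem.Chars.isspace c && pvOnlyWs t

-- helper pop_line_indent
def pvPopLineIndent : List Char → List Char
  | [] => []
  | c :: t => if c ≠ '\n' ∧ (c = ' ' ∨ c = '\t') then pvPopLineIndent t else c :: t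

-- the inline-comment trailing-blank pop loop
def pvPopTrailBlanks : List Char → List Char
  | [] => []
  | c :: t => if c = ' ' ∨ c = '\t' then pvPopTrailBlanks t else c :: t

def pvRunA : List Char → List Char → Bool → Char → Bool → Bool → List Char
  | [], out, _, _, _, _ => out
  | c :: rest, out, instr, delim, triple, esc =>
    if instr then
      if triple then
        match rest with
        | d1 :: d2 :: rest' =>
          if c = delim ∧ d1 = delim ∧ d2 = delim then
            pvRunA rest' (d2 :: d1 :: c :: out) false delim false esc
          else pvRunA (d1 :: d2 :: rest') (c :: out) true delim true esc
        | [d1] => pvRunA [d1] (c :: out) true delim true esc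
        | [] => pvRunA [] (c :: out) true delim true esc
      else
        if esc then pvRunA rest (c :: out) true delim false false
        else if c = '\\' then pvRunA rest (c :: out) true delim false true
        else if c = delim then pvRunA rest (c :: out) false delim false false
        else pvRunA rest (c :: out) true delim false false
    else if c = '\'' ∨ c = '"' then
      match rest with
      | d1 :: d2 :: rest' =>
        if d1 = c ∧ d2 = c then pvRunA rest' (c :: c :: c :: out) true c true esc
        else pvRunA (d1 :: d2 :: rest') (c :: out) true c false esc
      | [d1] => pvRunA [d1] (c :: out) true c false esc
      | [] => pvRunA [] (c :: out) true c false esc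
    else if c = '#' then
      let full := pvOnlyWs out
      let out1 := if full then pvPopLineIndent out else pvPopTrailBlanks out
      match h : rest.dropWhile (fun x => x != '\n') with
      | '\n' :: r2 => pvRunA r2 (if full then out1 else '\n' :: out1) instr delim triple esc
      | _ => out1
    else pvRunA rest (c :: out) false delim triple esc
termination_by s _ _ _ _ _ => s.length
decreasing_by
  all_goals simp_wf
  all_goals try omega
  all_goals
    (have := List.length_dropWhile_le (fun x => x != '\n') rest
     rw [h] at this; simp at this; omega)

-- delim starts as Python's '' (never read before being set); represented by ' '
def strip_comments_python_strict (code : String) : String :=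
  String.mk ((pvRunA code.toList [] false ' ' false false).reverse)

-- ===== PORT B =====
-- emit: commit the pending blank run, append c, update the whitespace-line flag
def pvEmitB (c : Char) (out pend : List Char) (ws : Bool) : List Char × Bool :=
  (c :: (pend ++ out), if c = '\n' then true else ws && PySem.Chars.isspace c)

def pvRunB : List Char → List Char → List Char → Bool → Bool → Char → Bool → Bool → List Char
  | [], out, pend, _, _, _, _, _ => pend ++ out
  | c :: rest, out, pend, ws, instr, delim, triple, esc =>
    if instr then
      let (out, ws) := pvEmitB c out pend ws
      if triple then
        match rest with
        | d1 :: d2 :: rest' =>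
          if c = delim ∧ d1 = delim ∧ d2 = delim then
            let (out, ws) := pvEmitB d1 out [] ws
            let (out, ws) := pvEmitB d2 out [] ws
            pvRunB rest' out [] ws false delim false esc
          else pvRunB (d1 :: d2 :: rest') out [] ws true delim true esc
        | [d1] => pvRunB [d1] out [] ws true delim true esc
        | [] => pvRunB [] out [] ws true delim true esc
      else
        if esc then pvRunB rest out [] ws true delim false false
        else if c = '\\' then pvRunB rest out [] ws true delim false true
        else if c = delim then pvRunB rest out [] ws false delim false false
        else pvRunB rest out [] ws true delim false false
    else if c = '\'' ∨ c = '"' then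
      match rest with
      | d1 :: d2 :: rest' =>
        if d1 = c ∧ d2 = c then
          let (out, ws) := pvEmitB c out pend ws
          let (out, ws) := pvEmitB c out [] ws
          let (out, ws) := pvEmitB c out [] ws
          pvRunB rest' out [] ws true c true esc
        else
          let (out, ws) := pvEmitB c out pend ws
          pvRunB (d1 :: d2 :: rest') out [] ws true c false esc
      | [d1] =>
        let (out, ws) := pvEmitB c out pend ws
        pvRunB [d1] out [] ws true c false esc
      | [] =>
        let (out, ws) := pvEmitB c out pend ws
        pvRunB [] out [] ws true c false esc
    else if c = '#' then
      -- pending blanks are dropped; keep_newline := not ws_line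
      match h : rest.dropWhile (fun x => x != '\n') with
      | '\n' :: r2 =>
        if !ws then
          let (out, ws) := pvEmitB '\n' out [] ws
          pvRunB r2 out [] ws instr delim triple esc
        else pvRunB r2 out [] ws instr delim triple esc
      | _ => ([] : List Char) ++ out
    else if c = ' ' ∨ c = '\t' then pvRunB rest out (c :: pend) ws instr delim triple esc
    else
      let (out, ws) := pvEmitB c out pend ws
      pvRunB rest out [] ws instr delim triple esc
termination_by s _ _ _ _ _ _ _ => s.length
decreasing_by
  all_goals simp_wf
  all_goals try omega
  all_goals
    (have := List.length_dropWhile_le (fun x => x != '\n') rest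
     rw [h] at this; simp at this; omega)

def strip_comments_python_strict_alt (code : String) : String :=
  String.mk ((pvRunB code.toList [] [] true false ' ' false false).reverse)

-- ===== PRECONDITION & SPEC =====
def Spec_strip_comments_python_strict (code : String) (out : String) : Prop := out = strip_comments_python_strict_alt code
instance (code : String) (out : String) : Decidable (Spec_strip_comments_python_strict code out) := by unfold Spec_strip_comments_python_strict; infer_instance

-- ===== CLAIM (what is proved, stated in full; the proofs are below) =====
def Claim_equal_strip_comments_python_strict : Prop := ∀ (code : String), Dom_strip_comments_python_strict code → Spec_strip_comments_python_strict code (strip_comments_python_strict code)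

-- ===== LEMMAS AND PROOFS =====

-- the committed output never has a blank (' '/'\t') at its (reversed) head outside strings
def pvHeadNotBlank : List Char → Prop
  | [] => True
  | c :: _ => ¬(c = ' ' ∨ c = '\t')

theorem pvOnlyWs_blank_append (pend l : List Char)
    (hp : ∀ x ∈ pend, x = ' ' ∨ x = '\t') :
    pvOnlyWs (pend ++ l) = pvOnlyWs l := by
  induction pend with
  | nil => rfl
  | cons c t ih =>
    have hc := hp c (by simp)
    have ht : ∀ x ∈ t, x = ' ' ∨ x = '\t' := fun x hx => hp x (by simp [hx])
    rcases hc with h | h <;> subst h <;>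
      simp [pvOnlyWs, ih ht, PySem.Chars.isspace]

theorem pvPopLineIndent_blank_append (pend l : List Char)
    (hp : ∀ x ∈ pend, x = ' ' ∨ x = '\t') (hl : pvHeadNotBlank l) :
    pvPopLineIndent (pend ++ l) = l := by
  induction pend with
  | nil =>
    cases l with
    | nil => rfl
    | cons c t => simp only [pvHeadNotBlank] at hl; simp [pvPopLineIndent, hl]
  | cons c t ih =>
    have hc := hp c (by simp)
    have ht : ∀ x ∈ t, x = ' ' ∨ x = '\t' := fun x hx => hp x (by simp [hx])
    rcases hc with h | h <;> subst h <;> simp [pvPopLineIndent, ih ht]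

theorem pvPopTrailBlanks_blank_append (pend l : List Char)
    (hp : ∀ x ∈ pend, x = ' ' ∨ x = '\t') (hl : pvHeadNotBlank l) :
    pvPopTrailBlanks (pend ++ l) = l := by
  induction pend with
  | nil =>
    cases l with
    | nil => rfl
    | cons c t => simp only [pvHeadNotBlank] at hl; simp [pvPopTrailBlanks, hl]
  | cons c t ih =>
    have hc := hp c (by simp)
    have ht : ∀ x ∈ t, x = ' ' ∨ x = '\t' := fun x hx => hp x (by simp [hx])
    rcases hc with h | h <;> subst h <;> simp [pvPopTrailBlanks, ih ht]

theorem pvEmit_ws (c : Char) (l : List Char) (ws : Bool) (h : pvOnlyWs l = ws) :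
    pvOnlyWs (c :: l) = (if c = '\n' then true else ws && PySem.Chars.isspace c) := by
  by_cases hc : c = '\n'
  · simp [pvOnlyWs, hc]
  · simp [pvOnlyWs, hc, ← h, Bool.and_comm]

theorem pvDropWhile_shape (l : List Char) :
    l.dropWhile (fun x => x != '\n') = [] ∨
      ∃ r2, l.dropWhile (fun x => x != '\n') = '\n' :: r2 := by
  induction l with
  | nil => left; rfl
  | cons c t ih =>
    by_cases hc : c = '\n'
    · right; exact ⟨t, by simp [List.dropWhile, hc]⟩
    · rw [List.dropWhile_cons_of_pos (by simp [hc])]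
      exact ih

theorem pvKey : ∀ (N : Nat) (s : List Char), s.length ≤ N →
    ∀ (out pend : List Char) (ws instr : Bool) (delim : Char) (triple esc : Bool),
    (∀ x ∈ pend, x = ' ' ∨ x = '\t') →
    pvOnlyWs (pend ++ out) = ws →
    (instr = true → pend = []) →
    (instr = false → pvHeadNotBlank out) →
    (instr = true → (delim = '\'' ∨ delim = '"')) →
    pvRunA s (pend ++ out) instr delim triple esc = pvRunB s out pend ws instr delim triple esc := by
  intro N
  induction N with
  | zero =>
    intro s hs out pend ws instr delim triple esc hp hw hip hib hd
    have hnil : s = [] := List.eq_nil_of_length_eq_zero (Nat.le_zero.mp hs)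
    subst hnil
    simp [pvRunA, pvRunB]
  | succ N ih =>
    intro s hs out pend ws instr delim triple esc hp hw hip hib hd
    match s with
    | [] => simp [pvRunA, pvRunB]
    | c :: rest =>
      simp only [List.length_cons, Nat.add_le_add_iff_right] at hs
      rw [pvRunA.eq_def, pvRunB.eq_def]
      simp only []
      by_cases hi : instr = true
      · subst hi
        have hpe : pend = [] := hip rfl
        subst hpe
        simp only [List.nil_append] at hw ⊢
        have hw1 := pvEmit_ws c out ws hw
        by_cases ht : triple = true
        · subst ht
          simp only [if_true]
          match rest with
          | d1 :: d2 :: rest' =>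
            have hs' : rest'.length ≤ N := by simp at hs; omega
            by_cases hc : (c = delim ∧ d1 = delim ∧ d2 = delim)
            · obtain ⟨h1, h2, h3⟩ := hc
              subst h1 h2 h3
              have hq := hd rfl
              have hw2 := pvEmit_ws d2 (d2 :: out) _ hw1
              have hw3 := pvEmit_ws d2 (d2 :: d2 :: out) _ hw2
              simp only [pvEmitB, List.nil_append, and_self, if_true]
              exact ih rest' hs' (d2 :: d2 :: d2 :: out) [] _ false d2 false esc
                (by simp) (by simpa using hw3) (by simp)
                (by intro _; rcases hq with h | h <;> simp [pvHeadNotBlank, h])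
                (by intro h; cases h)
            · simp only [pvEmitB, List.nil_append, if_neg hc]
              exact ih (d1 :: d2 :: rest') hs (c :: out) [] _ true delim true esc
                (by simp) (by simpa using hw1) (by simp) (by intro h; cases h) hd
          | [d1] =>
            simp only [pvEmitB, List.nil_append]
            exact ih [d1] hs (c :: out) [] _ true delim true esc
              (by simp) (by simpa using hw1) (by simp) (by intro h; cases h) hd
          | [] =>
            simp only [pvEmitB, List.nil_append]
            exact ih [] hs (c :: out) [] _ true delim true esc
              (by simp) (by simpa using hw1) (by simp) (by intro h; cases h) hd
        · rw [Bool.not_eq_true] at ht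
          subst ht
          simp only [Bool.false_eq_true, if_false]
          by_cases he : esc = true
          · subst he
            simp only [pvEmitB, List.nil_append, if_true]
            exact ih rest hs (c :: out) [] _ true delim false false
              (by simp) (by simpa using hw1) (by simp) (by intro h; cases h) hd
          · rw [Bool.not_eq_true] at he
            subst he
            simp only [Bool.false_eq_true, if_false]
            by_cases hbs : c = '\\'
            · subst hbs
              simp only [pvEmitB, List.nil_append, if_pos rfl]
              exact ih rest hs ('\\' :: out) [] _ true delim false true
                (by simp) (by simpa using hw1) (by simp) (by intro h; cases h) hd
            · by_cases hcd : c = delim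
              · subst hcd
                simp only [pvEmitB, List.nil_append, if_neg hbs, if_pos rfl]
                exact ih rest hs (c :: out) [] _ false c false false
                  (by simp) (by simpa using hw1) (by intro h; cases h)
                  (by intro _; rcases hd rfl with h | h <;> simp [pvHeadNotBlank, h])
                  (by intro h; cases h)
              · simp only [pvEmitB, List.nil_append, if_neg hbs, if_neg hcd]
                exact ih rest hs (c :: out) [] _ true delim false false
                  (by simp) (by simpa using hw1) (by simp) (by intro h; cases h) hd
      · rw [Bool.not_eq_true] at hi
        subst hi
        simp only [Bool.false_eq_true, if_false]
        have hb := hib rfl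
        have hw1 := pvEmit_ws c (pend ++ out) ws hw
        by_cases hqt : (c = '\'' ∨ c = '"')
        · simp only [if_pos hqt]
          match rest with
          | d1 :: d2 :: rest' =>
            by_cases hqq : (d1 = c ∧ d2 = c)
            · obtain ⟨h4, h5⟩ := hqq
              subst h4 h5
              have hw2 := pvEmit_ws d2 (d2 :: (pend ++ out)) _ hw1
              have hw3 := pvEmit_ws d2 (d2 :: d2 :: (pend ++ out)) _ hw2
              simp only [pvEmitB, List.nil_append, and_self, if_true]
              exact ih rest' (by simp at hs; omega) (d2 :: d2 :: d2 :: (pend ++ out)) [] _ true d2 true esc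
                (by simp) (by simpa using hw3) (by simp) (by intro h; cases h)
                (fun _ => hqt)
            · simp only [pvEmitB, List.nil_append, if_neg hqq]
              exact ih (d1 :: d2 :: rest') hs (c :: (pend ++ out)) [] _ true c false esc
                (by simp) (by simpa using hw1) (by simp) (by intro h; cases h)
                (fun _ => hqt)
          | [d1] =>
            simp only [pvEmitB, List.nil_append]
            exact ih [d1] hs (c :: (pend ++ out)) [] _ true c false esc
              (by simp) (by simpa using hw1) (by simp) (by intro h; cases h)
              (fun _ => hqt)
          | [] =>
            simp only [pvEmitB, List.nil_append]
            exact ih [] hs (c :: (pend ++ out)) [] _ true c false esc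
              (by simp) (by simpa using hw1) (by simp) (by intro h; cases h)
              (fun _ => hqt)
        · simp only [if_neg hqt]
          by_cases hh : c = '#'
          · subst hh
            simp only [if_pos rfl, hw,
              pvPopLineIndent_blank_append pend out hp hb,
              pvPopTrailBlanks_blank_append pend out hp hb, ite_self]
            have howl : pvOnlyWs out = ws :=
              (pvOnlyWs_blank_append pend out hp).symm.trans hw
            rcases pvDropWhile_shape rest with hdw | ⟨r2, hdw⟩
            · rw [hdw]
              simp
            · rw [hdw]
              have hr2 : r2.length ≤ N := by
                have := List.length_dropWhile_le (fun x => x != '\n') rest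
                rw [hdw] at this; simp at this; omega
              cases ws with
              | true =>
                simp only [if_pos rfl, Bool.not_true, Bool.false_eq_true, if_false]
                exact ih r2 hr2 out [] true false delim triple esc
                  (by simp) (by simpa using howl) (by intro h; cases h)
                  (fun _ => hb) hd
              | false =>
                simp only [Bool.false_eq_true, if_false, Bool.not_false, if_true,
                  pvEmitB, List.nil_append]
                exact ih r2 hr2 ('\n' :: out) [] _ false delim triple esc
                  (by simp) (by simp [pvOnlyWs]) (by intro h; cases h)
                  (by intro _; simp [pvHeadNotBlank]) hd
          · simp only [if_neg hh]
            by_cases hsp : (c = ' ' ∨ c = '\t')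
            · simp only [if_pos hsp]
              have hw' : pvOnlyWs ((c :: pend) ++ out) = ws := by
                rcases hsp with h | h <;> subst h <;>
                  simpa [pvOnlyWs, PySem.Chars.isspace] using hw
              have hmain := ih rest hs out (c :: pend) ws false delim triple esc
                (by intro x hx
                    rcases List.mem_cons.mp hx with h | h
                    · exact h ▸ hsp
                    · exact hp x h)
                hw' (by intro h; cases h) (fun _ => hb) hd
              simpa using hmain
            · simp only [if_neg hsp, pvEmitB, List.nil_append]
              exact ih rest hs (c :: (pend ++ out)) [] _ false delim triple esc
                (by simp) (by simpa using hw1) (by intro h; cases h)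
                (by intro _; simpa [pvHeadNotBlank] using hsp) hd

-- ===== VERDICT (by name: the statement is the Claim_ definition above) =====
theorem strip_comments_python_strict_spec : Claim_equal_strip_comments_python_strict := by
  intro code _
  unfold Spec_strip_comments_python_strict strip_comments_python_strict strip_comments_python_strict_alt
  have h := pvKey code.toList.length code.toList le_rfl [] [] true false ' ' false false
    (by simp) (by simp [pvOnlyWs]) (by simp) (fun _ => trivial) (by simp)
  simp at h
  rw [h]
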